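-- pv_equiv track=rewrite | github.com/CSC-101/programming-assignment-2-ryanweil | hw2.py | longest_repetition
-- ===== SOURCE A (Python) =====
-- from typing import Optional
--
-- def longest_repetition(numbers: list[int]) -> Optional[int]:
--     if not numbers:
--         return None
--
--     max_length = 0
--     max_start_index = 0
--     current_length = 1
--     current_start_index = 0
--
--     # Iterate through the list to find contiguous sequences
--     for i in range(1, len(numbers)):
--         if numbers[i] == numbers[i - 1]:  # Current sequence continues
--             current_length += 1
--         else:  # Current sequence ends
--             # Update max sequence if current is longer
--             if current_length > max_length:
--                 max_length = current_length
--                 max_start_index = current_start_index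
--             # Reset current sequence
--             current_length = 1
--             current_start_index = i
--
--     # Final check in case the longest sequence ends at the last element
--     if current_length > max_length:
--         max_start_index = current_start_index
--
--     return max_start_index
-- ===== SOURCE B (Python) =====
-- from typing import Optional
--
-- def longest_repetition(numbers: list[int]) -> Optional[int]:
--     if not numbers:
--         return None
--     # Stage 1: decompose the list into its maximal runs as (start, length) pairs.
--     runs = []
--     start = 0
--     n = len(numbers)
--     while start < n:
--         end = start
--         while end < n and numbers[end] == numbers[start]:
--             end += 1
--         runs.append((start, end - start))
--         start = end
--     # Stage 2: max with key=length returns the FIRST maximal run, i.e. the earliest.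
--     return max(runs, key=lambda r: r[1])[0]
-- ===== Notes on version B (the rewrite author's own statement) =====
-- stated objective: alternative
-- what changed: Replaces A's fused single pass (four carried state values: current/best length and start, plus a post-loop flush) by two staged passes: first materialise the full run table as (start, length) pairs, then select the answer with max(runs, key=length), whose first-maximal rule gives the earliest longest run.
import Mathlib
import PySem

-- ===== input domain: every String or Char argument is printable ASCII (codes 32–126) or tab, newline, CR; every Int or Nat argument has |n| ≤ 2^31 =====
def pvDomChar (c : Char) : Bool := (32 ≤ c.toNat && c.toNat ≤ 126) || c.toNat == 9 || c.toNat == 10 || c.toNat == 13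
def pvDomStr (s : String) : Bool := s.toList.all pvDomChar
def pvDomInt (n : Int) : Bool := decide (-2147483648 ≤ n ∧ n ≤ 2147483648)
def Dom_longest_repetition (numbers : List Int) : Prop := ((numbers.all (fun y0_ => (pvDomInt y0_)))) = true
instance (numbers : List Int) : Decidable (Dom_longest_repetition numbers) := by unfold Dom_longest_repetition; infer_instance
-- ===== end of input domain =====

-- B replaces A's fused single pass (current/best length+start plus a post-loop flush) by two
-- staged passes: build the full run table (start, length), then pick max(runs, key=length); same cost.

-- ===== PORT A =====
-- A's loop body; indexing via pyGetD (every index A reads is in range, so this is exact).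
def pvStepA (numbers : List Int) (st : Int × Int × Int × Int) (i : Int) : Int × Int × Int × Int :=
  if PySem.List.pyGetD numbers i 0 = PySem.List.pyGetD numbers (i - 1) 0 then
    (st.1, st.2.1, st.2.2.1 + 1, st.2.2.2)
  else
    if st.2.2.1 > st.1 then (st.2.2.1, st.2.2.2, 1, i) else (st.1, st.2.1, 1, i)

def longest_repetition (numbers : List Int) : Option Int :=
  if numbers = [] then none
  else
    let s := (PySem.List.pyRange 1 (numbers.length : Int) 1).foldl (pvStepA numbers) (0, 0, 1, 0)
    -- final check in case the longest sequence ends at the last element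
    some (if s.2.2.1 > s.1 then s.2.2.2 else s.2.1)

-- ===== PORT B =====
-- Stage 1 of Source B: the outer while loop appending one (start, length) pair per maximal run;
-- the inner 'while numbers[end] == numbers[start]' scan is the takeWhile/dropWhile split.
def pvRunsB : List Int → Int → List (Int × Int)
  | [], _ => []
  | x :: t, start =>
    let len : Int := (t.takeWhile (· == x)).length + 1
    (start, len) :: pvRunsB (t.dropWhile (· == x)) (start + len)
termination_by t => t.length
decreasing_by all_goals
  exact Nat.lt_succ_of_le (List.length_dropWhile_le _ _)

def longest_repetition_alt (numbers : List Int) : Option Int :=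
  if numbers = [] then none
  else
    -- Stage 2 of Source B: max(runs, key=lambda r: r[1])[0]
    (PySem.List.max? (pvRunsB numbers 0) (·.2)).map (·.1)

-- ===== PRECONDITION & SPEC =====
def Spec_longest_repetition (numbers : List Int) (out : Option Int) : Prop := out = longest_repetition_alt numbers
instance (numbers : List Int) (out : Option Int) : Decidable (Spec_longest_repetition numbers out) := by unfold Spec_longest_repetition; infer_instance

-- ===== CLAIM (what is proved, stated in full; the proofs are below) =====
def Claim_equal_longest_repetition : Prop := ∀ (numbers : List Int), Dom_longest_repetition numbers → Spec_longest_repetition numbers (longest_repetition numbers)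

-- ===== LEMMAS AND PROOFS =====

-- A's loop rephrased structurally: carries the loop index, the previous element and the state.
def pvLoopA : List Int → Int → Int → (Int × Int × Int × Int) → (Int × Int × Int × Int)
  | [], _, _, s => s
  | y :: ys, i, prev, (mL, mS, cL, cS) =>
    pvLoopA ys (i + 1) y
      (if y = prev then (mL, mS, cL + 1, cS)
       else if cL > mL then (cL, cS, 1, i) else (mL, mS, 1, i))

def pvFinish (s : Int × Int × Int × Int) : Int := if s.2.2.1 > s.1 then s.2.2.2 else s.2.1

-- B's stage 2 as a plain fold over the run table, carrying the best (start, length) pair so far.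
def pvFoldMax (best : Int × Int) (runs : List (Int × Int)) : Int × Int :=
  runs.foldl (fun b r => if b.2 < r.2 then r else b) best

theorem pvDWhead {α : Type} (p : α → Bool) (l : List α) (y : α) (t : List α)
    (h : l.dropWhile p = y :: t) : p y = false := by
  induction l with
  | nil => simp at h
  | cons a l ih =>
    rw [List.dropWhile_cons] at h
    by_cases hp : p a
    · rw [if_pos hp] at h; exact ih h
    · rw [if_neg hp] at h
      cases h
      simpa using hp

theorem pvTakeWhileDropWhile {α : Type} (p : α → Bool) (l : List α) :
    (l.dropWhile p).takeWhile p = [] := by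
  cases hr : l.dropWhile p with
  | nil => simp
  | cons y t =>
    have hy := pvDWhead p l y t hr
    simp [hy]

-- L1: the pyRange fold of A's body is pvLoopA on the corresponding suffix
theorem pvL1 (numbers : List Int) (t : List Int) (i prev : Int) (s : Int × Int × Int × Int)
    (hi : 1 ≤ i) (hd : numbers.drop (i.toNat - 1) = prev :: t) :
    (PySem.List.pyRange i (numbers.length : Int) 1).foldl (pvStepA numbers) s
      = pvLoopA t i prev s := by
  induction t generalizing i prev s with
  | nil =>
    have hlen : numbers.length - (i.toNat - 1) = 1 := by
      have := congrArg List.length hd; simpa using this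
    rw [PySem.List.pyRange_one_eq_nil (by omega)]
    rfl
  | cons y ys ih =>
    have hlen : numbers.length - (i.toNat - 1) = ys.length + 2 := by
      have := congrArg List.length hd; simpa using this
    have hi' : i < (numbers.length : Int) := by omega
    have h0 : (0:Int) ≤ i := by omega
    rw [PySem.List.pyRange_one_cons hi', List.foldl_cons]
    have e1 : PySem.List.pyGetD numbers i 0 = y := by
      rw [PySem.List.pyGetD_eq_getElem numbers 0 h0 hi']
      have hq : numbers[i.toNat]? = (numbers.drop (i.toNat - 1))[1]? := by
        rw [List.getElem?_drop]; congr 1; omega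
      rw [hd] at hq; simp at hq
      simp [List.getElem?_eq_some_iff] at hq
      exact hq.2
    have e2 : PySem.List.pyGetD numbers (i - 1) 0 = prev := by
      rw [PySem.List.pyGetD_eq_getElem numbers 0 (by omega) (by omega)]
      have h5 : (i - 1).toNat = i.toNat - 1 := by omega
      simp only [h5]
      have hq : numbers[i.toNat - 1]? = (numbers.drop (i.toNat - 1))[0]? := by
        rw [List.getElem?_drop]; congr 1
      rw [hd] at hq; simp at hq
      simp [List.getElem?_eq_some_iff] at hq
      exact hq.2
    have hst : pvStepA numbers s i =
        (if y = prev then (s.1, s.2.1, s.2.2.1 + 1, s.2.2.2)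
         else if s.2.2.1 > s.1 then (s.2.2.1, s.2.2.2, 1, i) else (s.1, s.2.1, 1, i)) := by
      unfold pvStepA; rw [e1, e2]
    have hd' : numbers.drop ((i+1).toNat - 1) = y :: ys := by
      have h2 : (i+1).toNat - 1 = i.toNat - 1 + 1 := by omega
      rw [h2, ← List.drop_drop, hd]
      rfl
    rw [hst]
    obtain ⟨mL, mS, cL, cS⟩ := s
    simp only [pvLoopA]
    exact ih (i+1) y _ (by omega) hd'

-- L2a: pvLoopA over a block of elements equal to prev just extends the current run
theorem pvL2a (k : Nat) (xs : List Int) (i prev mL mS cL cS : Int) :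
    pvLoopA (List.replicate k prev ++ xs) i prev (mL, mS, cL, cS)
      = pvLoopA xs (i + k) prev (mL, mS, cL + k, cS) := by
  induction k generalizing i cL with
  | zero => simp
  | succ k ih =>
    rw [List.replicate_succ, List.cons_append, pvLoopA, if_pos rfl, ih]
    have h1 : i + 1 + (k : Int) = i + ((k + 1 : Nat) : Int) := by push_cast; ring
    have h2 : cL + 1 + (k : Int) = cL + ((k + 1 : Nat) : Int) := by push_cast; ring
    rw [h1, h2]

-- L2: main invariant — A's loop plus final flush equals the best-run fold over B's run table
theorem pvL2 (xs : List Int) (prev mL mS cS cL : Int) (h1 : 1 ≤ cL) :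
    pvFinish (pvLoopA xs (cS + cL) prev (mL, mS, cL, cS))
      = (pvFoldMax (mS, mL) (pvRunsB (List.replicate cL.toNat prev ++ xs) cS)).1 := by
  have ha : xs.takeWhile (· == prev) = List.replicate (xs.takeWhile (· == prev)).length prev := by
    rw [List.eq_replicate_iff]
    exact ⟨rfl, fun b hb => by have := List.mem_takeWhile_imp hb; simpa using this⟩
  set k := (xs.takeWhile (· == prev)).length with hk
  set r := xs.dropWhile (· == prev) with hrdef
  have hxs : xs = List.replicate k prev ++ r := by
    conv_lhs => rw [← List.takeWhile_append_dropWhile (p := (· == prev)) (l := xs)]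
    rw [ha]
  obtain ⟨m, hm⟩ : ∃ m, cL.toNat = m + 1 := ⟨cL.toNat - 1, by omega⟩
  have hcomb : List.replicate cL.toNat prev ++ (List.replicate k prev ++ r)
      = prev :: (List.replicate (m + k) prev ++ r) := by
    rw [← List.append_assoc, ← List.replicate_add, hm]
    have h3 : m + 1 + k = (m + k) + 1 := by omega
    rw [h3, List.replicate_succ, List.cons_append]
  have htw : (List.replicate (m + k) prev ++ r).takeWhile (· == prev)
      = List.replicate (m + k) prev := by
    rw [List.takeWhile_append, List.takeWhile_replicate]
    simp [hrdef, pvTakeWhileDropWhile]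
  have hdw : (List.replicate (m + k) prev ++ r).dropWhile (· == prev) = r := by
    rw [List.dropWhile_append, List.dropWhile_replicate]
    simp [hrdef, List.dropWhile_idempotent]
  have hlenInt : (((List.replicate (m + k) prev ++ r).takeWhile (· == prev)).length : Int) + 1
      = cL + k := by rw [htw, List.length_replicate]; push_cast; omega
  rw [hxs, pvL2a, hcomb, pvRunsB]
  simp only [hlenInt, hdw]
  cases hr : r with
  | nil =>
    simp only [pvLoopA, pvFinish, pvFoldMax, pvRunsB, List.foldl_cons, List.foldl_nil]
    by_cases hcmp : cL + (k : Int) > mL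
    · rw [if_pos hcmp, if_pos (by simpa using hcmp)]
    · rw [if_neg hcmp, if_neg (by simpa using hcmp)]
  | cons y r' =>
    have hdr : xs.dropWhile (· == prev) = y :: r' := by rw [← hrdef]; exact hr
    have hy : (y == prev) = false := pvDWhead _ xs y r' hdr
    have hyne : ¬ (y = prev) := by simpa using hy
    have hlt : r'.length < xs.length := by
      have h4 := congrArg List.length hxs
      rw [hr] at h4; simp at h4; omega
    rw [pvLoopA, if_neg hyne]
    have hfold : ∀ b : Int × Int,
        pvFoldMax (mS, mL) ((cS, cL + (k:Int)) :: pvRunsB (y :: r') (cS + (cL + (k:Int))))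
          = pvFoldMax (if mL < cL + (k:Int) then (cS, cL + (k:Int)) else (mS, mL))
              (pvRunsB (y :: r') (cS + (cL + (k:Int)))) := by
      intro _; simp only [pvFoldMax, List.foldl_cons]
    by_cases hcmp : cL + (k : Int) > mL
    · rw [if_pos hcmp, hfold (0,0), if_pos (by simpa using hcmp)]
      have hrec := pvL2 r' y (cL + k) cS (cS + cL + k) 1 (by norm_num)
      simp only [Int.toNat_one, List.replicate_one, List.singleton_append] at hrec
      rw [show cS + (cL + (k:Int)) = cS + cL + k from by ring]
      exact hrec
    · rw [if_neg hcmp, hfold (0,0), if_neg (by simpa using hcmp)]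
      have hrec := pvL2 r' y mL mS (cS + cL + k) 1 (by norm_num)
      simp only [Int.toNat_one, List.replicate_one, List.singleton_append] at hrec
      rw [show cS + (cL + (k:Int)) = cS + cL + k from by ring]
      exact hrec
termination_by xs.length
decreasing_by all_goals exact hlt

-- L3: on a run table whose head has positive length, Python's max-with-key is the best-run fold
-- seeded with the impossible best (·, 0).
theorem pvL3aux (r : Int × Int) (rs : List (Int × Int)) :
    List.foldl
      (fun (acc : Option (Int × Int)) (x : Int × Int) =>
        match acc with
        | none => some x
        | some m => if m.2 < x.2 then some x else some m)
      (some r) rs = some (List.foldl (fun b r => if b.2 < r.2 then r else b) r rs) := by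
  induction rs generalizing r with
  | nil => rfl
  | cons a t ih =>
    simp only [List.foldl_cons]
    by_cases h : r.2 < a.2
    · rw [if_pos h, if_pos h]; exact ih a
    · rw [if_neg h, if_neg h]; exact ih r

-- L3: on a run table whose head has positive length, Python's max-with-key is the best-run fold
-- seeded with the impossible best (·, 0).
theorem pvL3 (r : Int × Int) (rs : List (Int × Int)) (s0 : Int) (hr : 0 < r.2) :
    PySem.List.max? (r :: rs) (·.2) = some (pvFoldMax (s0, 0) (r :: rs)) := by
  simp only [pvFoldMax, List.foldl_cons, if_pos hr, PySem.List.max?]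
  convert pvL3aux r rs using 2
  funext acc x
  cases acc <;> rfl

-- ===== VERDICT (by name: the statement is the Claim_ definition above) =====
theorem longest_repetition_spec : Claim_equal_longest_repetition := by
  intro numbers _
  unfold Spec_longest_repetition
  simp only [longest_repetition, longest_repetition_alt]
  cases numbers with
  | nil => rfl
  | cons x t =>
    have hne : x :: t ≠ [] := by simp
    rw [if_neg hne, if_neg hne]
    have h1 := pvL1 (x :: t) t 1 x (0, 0, 1, 0) (le_refl 1) (by simp)
    have h2 := pvL2 t x 0 0 0 1 (by norm_num)
    simp only [Int.toNat_one, List.replicate_one, List.singleton_append, zero_add] at h2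
    rw [h1]
    show some (pvFinish (pvLoopA t 1 x (0, 0, 1, 0)))
      = (PySem.List.max? (pvRunsB (x :: t) 0) (·.2)).map (·.1)
    rw [pvRunsB]
    rw [pvL3 _ _ 0 (by positivity)]
    rw [Option.map_some]
    rw [h2, pvRunsB]
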